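-- pv_equiv track=rewrite | github.com/smilehat403/for-coding-test | Programmers/[Pro][Lv3]express num to N.py | solution
-- ===== SOURCE A (Python) =====
-- def solution(N, number):
--     answer = 0
--     # 5 1개로 만들 수 있는 수 -> 5
--     # 5 2개로 만들 수 있는 수 -> 10 0 25 1 55   -> 어떻게 합칠까?
--     # 중복을 없애기 위해 set을 이용. set의 index+1은 N의 갯수를 의미
--     numset = [set() for _ in range(8)]      # [set(), set(), set(), set(), set(), set(), set(), set()]
--     for i,x in enumerate(numset,start = 1): # i가 1부터 시작
--         x.add(int(str(N)*i))                # str(N)*i를 이용해서 숫자를 합치는 거 -> 미쳤음 아이디어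
--                                             # [{5}, {55}, {555}, {5555}, {55555}, {555555}, {5555555}, {55555555}]
--     # {55} -> {10, 0, 25, 1, 55}로 변신시켜야함
--     # for num1 in numset[0]:
--     #     for num2 in numset[0]:
--     #         numset[1].add(num1+num2)
--     #         numset[1].add(num1-num2)
--     #         numset[1].add(num1*num2)
--     #         if num2 :                       # 0일때 예외처리.... 아오
--     #             numset[1].add(num1//num2)   # 소수점 무시
--     #
--     # {555} -> {}은 (numset[0],numset[1])U(numset[1],numset[0]) 순서에 영향 받음
--     #
--     # for num1 in numset[1]:
--     #     for num2 in numset[0]: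
--     #
--     # for num1 in numset[0]:
--     #     for num2 in numset[1]:
--
--     for i in range(1,8):                      # 숫자 사용 갯수
--         for j in range(i):                    # 사용 갯수 index
--             for num1 in numset[j]:
--                 for num2 in numset[i-j-1]:
--                     numset[i].add(num1+num2)
--                     numset[i].add(num1-num2)
--                     numset[i].add(num1*num2)
--                     if num2 :                       # 0일때 예외처리.... 아오
--                         numset[i].add(num1//num2)   # 소수점 무시
--
--     for i,x in enumerate(numset,start=1):
--         if number in x:
--             answer = i
--             return answer
--
--     answer = -1     # 8번 안에 없다는 뜻 -> -1
--
--     return answer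
-- ===== SOURCE B (Python) =====
-- def solution(N, number):
--     # Top-down memoized recursion: reach(count) = every value expressible with
--     # exactly `count` copies of N (concatenation seed + arithmetic combinations).
--     memo = {}
--
--     def reach(count):
--         if count in memo:
--             return memo[count]
--         vals = {int(str(N) * count)}
--         for k in range(1, count):
--             left = reach(k)
--             right = reach(count - k)
--             for a in left:
--                 for b in right:
--                     vals.update((a + b, a - b, a * b))
--                     if b:
--                         vals.add(a // b)
--         memo[count] = vals
--         return vals
--
--     for count in range(1, 9):
--         if number in reach(count):
--             return count
--     return -1
-- ===== Notes on version B (the rewrite author's own statement) =====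
-- stated objective: alternative
-- what changed: Replaces A's bottom-up array of 8 level-sets filled by a triple index loop (plus a final enumerate scan over all 8 sets) with a top-down memoized recursion reach(count) over the same recurrence, queried lazily with an early return at the first count that contains the number.
-- crash fix: For N < 0 Python A always raises ValueError while seeding (int('-5-5')); when number = N, B returns 1 (reach(1) = {N} is checked before any multi-copy seed is parsed), and otherwise B raises the same ValueError. — e.g. on solution(-5, -5): A raises ValueError, B returns 1
import Mathlib
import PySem

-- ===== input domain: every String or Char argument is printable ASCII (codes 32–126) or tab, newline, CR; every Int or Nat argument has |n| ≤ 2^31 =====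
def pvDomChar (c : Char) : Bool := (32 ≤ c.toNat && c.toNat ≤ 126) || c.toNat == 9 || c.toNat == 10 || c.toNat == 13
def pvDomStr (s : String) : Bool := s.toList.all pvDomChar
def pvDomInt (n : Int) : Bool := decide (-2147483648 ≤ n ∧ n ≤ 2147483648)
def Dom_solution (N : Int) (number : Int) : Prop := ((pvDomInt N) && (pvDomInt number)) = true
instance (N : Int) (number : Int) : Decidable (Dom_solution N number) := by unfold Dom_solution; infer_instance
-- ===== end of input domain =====

-- B replaces A's bottom-up array of 8 level-sets (triple index loop) by a top-down
-- memoized recursion reach(count) with an early-return scan; same values, different decomposition.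
--
-- Python's hash sets are modelled by Std.TreeSet Int (so the ports evaluate in reasonable
-- time): only set membership and the final membership scans reach the result, never the
-- iteration order of a set (Python's hash order is unspecified anyway), which the
-- equivalence proof below makes precise by working with memberships only.

-- shared seed: int(str(N) * c). Exact under Pre_solution (0 ≤ N, where the parse succeeds);
-- for N < 0 and c ≥ 2 Python raises ValueError (outside Pre_solution), the `.getD 0` is never meant.
def seedNum (N : Int) (c : Nat) : Int :=
  (PySem.Int.ofChars? (List.flatten (List.replicate c (PySem.Int.toChars N)))).getD 0

-- ===== PORT A =====
-- final loop of A: for i, x in enumerate(numset, start=1): if number in x: return i / else -1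
def solutionScan : List (Std.TreeSet Int) → Int → Int → Int
  | [], _, _ => -1
  | x :: rest, number, i =>
    if x.contains number then i else solutionScan rest number (i + 1)

def solution (N : Int) (number : Int) : Int :=
  -- `[set() for _ in range(8)]` followed by the enumerate-add seeding loop, fused into one map
  let numset : List (Std.TreeSet Int) :=
    (List.range 8).map (fun t => (∅ : Std.TreeSet Int).insert (seedNum N (t + 1)))
  let numset := (PySem.List.pyRange 1 8).foldl (fun ns i =>
    (PySem.List.pyRange 0 i).foldl (fun ns j =>
      PySem.List.pySetD ns i (
        (PySem.List.pyGetD ns j ∅).foldl (fun acc num1 =>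
          (PySem.List.pyGetD ns (i - j - 1) ∅).foldl (fun acc num2 =>
            let acc := acc.insert (num1 + num2)
            let acc := acc.insert (num1 - num2)
            let acc := acc.insert (num1 * num2)
            if num2 ≠ 0 then acc.insert (PySem.Int.floordiv num1 num2) else acc)
            acc)
          (PySem.List.pyGetD ns i ∅))) ns) numset
  solutionScan numset number 1

-- ===== PORT B =====
-- reach(count): the set of values expressible with exactly `count` copies of N.
-- (Python memoizes reach in a dict; the memo only avoids recomputation, values are identical.)
mutual
def reachB (N : Int) (c : Nat) : Std.TreeSet Int :=
  splitsB N c 0 ((∅ : Std.TreeSet Int).insert (seedNum N c))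
termination_by (c, c + 1)
decreasing_by exact Prod.Lex.right _ (by omega)

-- the `for k in range(1, count)` loop of reach; parameter k'+1 is Python's k
def splitsB (N : Int) (c : Nat) (k' : Nat) (vals : Std.TreeSet Int) : Std.TreeSet Int :=
  if _h : k' + 1 < c then
    let left := reachB N (k' + 1)
    let right := reachB N (c - (k' + 1))
    splitsB N c (k' + 1)
      (left.foldl (fun vals a =>
        right.foldl (fun vals b =>
          let vals := [a + b, a - b, a * b].foldl (fun vals v => vals.insert v) vals
          if b ≠ 0 then vals.insert (PySem.Int.floordiv a b) else vals) vals) vals)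
  else vals
termination_by (c, c - k')
decreasing_by
  · exact Prod.Lex.left _ _ (by omega)
  · exact Prod.Lex.left _ _ (by omega)
  · exact Prod.Lex.right _ (by omega)
end

-- for count in range(1, 9): if number in reach(count): return count / else -1
def solutionAltLoop (N : Int) (number : Int) : List Int → Int
  | [] => -1
  | c :: rest =>
    if (reachB N c.toNat).contains number then c else solutionAltLoop N number rest

def solution_alt (N : Int) (number : Int) : Int :=
  solutionAltLoop N number (PySem.List.pyRange 1 9)

-- ===== PRECONDITION & SPEC =====
-- Pre_ excludes N < 0, where Python's int(str(N)*i) raises ValueError ('-5-5') while seeding.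
def Pre_solution (N : Int) (number : Int) : Prop := 0 ≤ N
instance (N : Int) (number : Int) : Decidable (Pre_solution N number) := by unfold Pre_solution; infer_instance
def pvWitness_solution : Int × Int := (5, 12)

-- On N < 0 with number = N, A raises ValueError while B returns 1 (reach(1) = {N} is checked
-- before any multi-copy seed is parsed).
def Raises_solution (N : Int) (number : Int) : Prop := N < 0 ∧ number = N
instance (N : Int) (number : Int) : Decidable (Raises_solution N number) := by unfold Raises_solution; infer_instance
def pvRaiseWitness_solution : Int × Int := (-5, -5)
def pvRaiseWitnessOut_solution : Int := 1

def Spec_solution (N : Int) (number : Int) (out : Int) : Prop := out = solution_alt N number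
instance (N : Int) (number : Int) (out : Int) : Decidable (Spec_solution N number out) := by unfold Spec_solution; infer_instance

-- ===== CLAIM (what is proved, stated in full; the proofs are below) =====
def Claim_equal_solution : Prop := ∀ (N : Int) (number : Int), Dom_solution N number → Pre_solution N number → Spec_solution N number (solution N number)
def Claim_raises_solution : Prop := (∀ (N : Int) (number : Int), Dom_solution N number → Raises_solution N number → ¬ Pre_solution N number) ∧ (Dom_solution (pvRaiseWitness_solution.1) (pvRaiseWitness_solution.2) ∧ Raises_solution (pvRaiseWitness_solution.1) (pvRaiseWitness_solution.2) ∧ solution_alt (pvRaiseWitness_solution.1) (pvRaiseWitness_solution.2) = pvRaiseWitnessOut_solution)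

-- ===== LEMMAS AND PROOFS =====

-- Std.TreeSet.mem_insert with the comparison turned into equality
lemma tmem_insert (t : Std.TreeSet Int) (k x : Int) : x ∈ t.insert k ↔ x = k ∨ x ∈ t := by
  rw [Std.TreeSet.mem_insert]
  constructor
  · rintro (h | h)
    · exact Or.inl (Std.LawfulEqCmp.compare_eq_iff_eq.mp h).symm
    · exact Or.inr h
  · rintro (rfl | h)
    · exact Or.inl (Std.LawfulEqCmp.compare_eq_iff_eq.mpr rfl)
    · exact Or.inr h

-- x is one of the four arithmetic combinations of a and b
def OpRel (a b x : Int) : Prop :=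
  x = a + b ∨ x = a - b ∨ x = a * b ∨ (b ≠ 0 ∧ x = PySem.Int.floordiv a b)

-- the recurrence both programs compute: the values reachable with exactly c copies of N
inductive Reach (N : Int) : Nat → Int → Prop where
  | seed (c : Nat) : Reach N c (seedNum N c)
  | comb (k m : Nat) (a b x : Int) (hk : 0 < k) (hm : 0 < m)
      (ha : Reach N k a) (hb : Reach N m b) (hx : OpRel a b x) : Reach N (k + m) x

lemma reach_cases {N : Int} {c : Nat} {x : Int} (h : Reach N c x) :
    x = seedNum N c ∨ ∃ k m a b, c = k + m ∧ 0 < k ∧ 0 < m ∧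
      Reach N k a ∧ Reach N m b ∧ OpRel a b x := by
  cases h with
  | seed => exact Or.inl rfl
  | comb k m a b x hk hm ha hb hx => exact Or.inr ⟨k, m, a, b, rfl, hk, hm, ha, hb, hx⟩

lemma mem_opsA (acc : Std.TreeSet Int) (a b x : Int) :
    x ∈ (let acc1 := acc.insert (a + b)
         let acc2 := acc1.insert (a - b)
         let acc3 := acc2.insert (a * b)
         if b ≠ 0 then acc3.insert (PySem.Int.floordiv a b) else acc3)
    ↔ x ∈ acc ∨ OpRel a b x := by
  by_cases hb : b = 0 <;>
    simp [hb, tmem_insert, OpRel] <;> tauto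

lemma mem_opsB (vals : Std.TreeSet Int) (a b x : Int) :
    x ∈ (let vals1 := [a + b, a - b, a * b].foldl (fun vals v => vals.insert v) vals
         if b ≠ 0 then vals1.insert (PySem.Int.floordiv a b) else vals1)
    ↔ x ∈ vals ∨ OpRel a b x := by
  by_cases hb : b = 0 <;>
    simp [hb, List.foldl, tmem_insert, OpRel] <;> tauto

-- membership through A's innermost double loop (as a fold over element lists)
lemma mem_foldA (sa sb : List Int) (x : Int) : ∀ acc : Std.TreeSet Int,
    x ∈ sa.foldl (fun (acc : Std.TreeSet Int) (num1 : Int) =>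
      sb.foldl (fun (acc : Std.TreeSet Int) (num2 : Int) =>
        let acc1 := acc.insert (num1 + num2)
        let acc2 := acc1.insert (num1 - num2)
        let acc3 := acc2.insert (num1 * num2)
        if num2 ≠ 0 then acc3.insert (PySem.Int.floordiv num1 num2) else acc3) acc) acc
    ↔ x ∈ acc ∨ ∃ a ∈ sa, ∃ b ∈ sb, OpRel a b x := by
  have inner : ∀ (a : Int) (sb' : List Int) (acc : Std.TreeSet Int),
      x ∈ sb'.foldl (fun (acc : Std.TreeSet Int) (num2 : Int) =>
        let acc1 := acc.insert (a + num2)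
        let acc2 := acc1.insert (a - num2)
        let acc3 := acc2.insert (a * num2)
        if num2 ≠ 0 then acc3.insert (PySem.Int.floordiv a num2) else acc3) acc
      ↔ x ∈ acc ∨ ∃ b ∈ sb', OpRel a b x := by
    intro a sb'
    induction sb' with
    | nil => intro acc; simp
    | cons b bs ih =>
      intro acc
      simp only [List.foldl_cons]
      rw [ih, mem_opsA]
      simp only [List.mem_cons]
      constructor
      · rintro ((h | h) | ⟨b', hb', h⟩)
        · exact Or.inl h
        · exact Or.inr ⟨b, Or.inl rfl, h⟩
        · exact Or.inr ⟨b', Or.inr hb', h⟩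
      · rintro (h | ⟨b', (rfl | hb'), h⟩)
        · exact Or.inl (Or.inl h)
        · exact Or.inl (Or.inr h)
        · exact Or.inr ⟨b', hb', h⟩
  induction sa with
  | nil => intro acc; simp
  | cons a as ih =>
    intro acc
    simp only [List.foldl_cons]
    rw [ih, inner]
    simp only [List.mem_cons]
    constructor
    · rintro ((h | ⟨b, hb, h⟩) | ⟨a', ha', h⟩)
      · exact Or.inl h
      · exact Or.inr ⟨a, Or.inl rfl, b, hb, h⟩
      · exact Or.inr ⟨a', Or.inr ha', h⟩
    · rintro (h | ⟨a', (rfl | ha'), b, hb, h⟩)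
      · exact Or.inl (Or.inl h)
      · exact Or.inl (Or.inr ⟨b, hb, h⟩)
      · exact Or.inr ⟨a', ha', b, hb, h⟩

-- membership through B's innermost double loop (as a fold over element lists)
lemma mem_foldB (sa sb : List Int) (x : Int) : ∀ acc : Std.TreeSet Int,
    x ∈ sa.foldl (fun (vals : Std.TreeSet Int) (a : Int) =>
      sb.foldl (fun (vals : Std.TreeSet Int) (b : Int) =>
        let vals1 := [a + b, a - b, a * b].foldl (fun vals v => vals.insert v) vals
        if b ≠ 0 then vals1.insert (PySem.Int.floordiv a b) else vals1) vals) acc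
    ↔ x ∈ acc ∨ ∃ a ∈ sa, ∃ b ∈ sb, OpRel a b x := by
  have inner : ∀ (a : Int) (sb' : List Int) (acc : Std.TreeSet Int),
      x ∈ sb'.foldl (fun (vals : Std.TreeSet Int) (b : Int) =>
        let vals1 := [a + b, a - b, a * b].foldl (fun vals v => vals.insert v) vals
        if b ≠ 0 then vals1.insert (PySem.Int.floordiv a b) else vals1) acc
      ↔ x ∈ acc ∨ ∃ b ∈ sb', OpRel a b x := by
    intro a sb'
    induction sb' with
    | nil => intro acc; simp
    | cons b bs ih =>
      intro acc
      rw [List.foldl_cons, ih]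
      have hstep := mem_opsB acc a b x
      simp only [List.mem_cons]
      constructor
      · rintro (h | ⟨b', hb', h⟩)
        · rcases hstep.mp h with h | h
          · exact Or.inl h
          · exact Or.inr ⟨b, Or.inl rfl, h⟩
        · exact Or.inr ⟨b', Or.inr hb', h⟩
      · rintro (h | ⟨b', (rfl | hb'), h⟩)
        · exact Or.inl (hstep.mpr (Or.inl h))
        · exact Or.inl (hstep.mpr (Or.inr h))
        · exact Or.inr ⟨b', hb', h⟩
  induction sa with
  | nil => intro acc; simp
  | cons a as ih =>
    intro acc
    rw [List.foldl_cons, ih]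
    have hstep := inner a sb acc
    simp only [List.mem_cons]
    constructor
    · rintro (h | ⟨a', ha', b, hb, h⟩)
      · rcases hstep.mp h with h | ⟨b, hb, h⟩
        · exact Or.inl h
        · exact Or.inr ⟨a, Or.inl rfl, b, hb, h⟩
      · exact Or.inr ⟨a', Or.inr ha', b, hb, h⟩
    · rintro (h | ⟨a', (rfl | ha'), b, hb, h⟩)
      · exact Or.inl (hstep.mpr (Or.inl h))
      · exact Or.inl (hstep.mpr (Or.inr ⟨b, hb, h⟩))
      · exact Or.inr ⟨a', ha', b, hb, h⟩

lemma mem_splitsB (N : Int) (c : Nat) : ∀ (n k : Nat), c - k = n → ∀ (vals : Std.TreeSet Int) (x : Int),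
    x ∈ splitsB N c k vals ↔
      x ∈ vals ∨ ∃ j : Nat, k < j ∧ j < c ∧
        ∃ a b, a ∈ reachB N j ∧ b ∈ reachB N (c - j) ∧ OpRel a b x := by
  intro n
  induction n with
  | zero =>
    intro k hk vals x
    rw [splitsB, dif_neg (by omega)]
    constructor
    · exact Or.inl
    · rintro (h | ⟨j, hj1, hj2, _⟩)
      · exact h
      · omega
  | succ n ih =>
    intro k hk vals x
    rw [splitsB]
    by_cases h : k + 1 < c
    · rw [dif_pos h]
      rw [ih (k + 1) (by omega)]
      simp only [Std.TreeSet.foldl_eq_foldl_toList]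
      rw [mem_foldB]
      simp only [Std.TreeSet.mem_toList]
      constructor
      · rintro ((h0 | ⟨a, ha, b, hb, hop⟩) | ⟨j, hj1, hj2, a, b, ha, hb, hop⟩)
        · exact Or.inl h0
        · exact Or.inr ⟨k + 1, by omega, h, a, b, ha, hb, hop⟩
        · exact Or.inr ⟨j, by omega, hj2, a, b, ha, hb, hop⟩
      · rintro (h0 | ⟨j, hj1, hj2, a, b, ha, hb, hop⟩)
        · exact Or.inl (Or.inl h0)
        · by_cases hj : j = k + 1
          · subst hj; exact Or.inl (Or.inr ⟨a, ha, b, hb, hop⟩)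
          · exact Or.inr ⟨j, by omega, hj2, a, b, ha, hb, hop⟩
    · rw [dif_neg h]
      constructor
      · exact Or.inl
      · rintro (h0 | ⟨j, hj1, hj2, _⟩)
        · exact h0
        · omega

lemma mem_reachB (N : Int) : ∀ (c : Nat) (x : Int), x ∈ reachB N c ↔ Reach N c x := by
  intro c
  induction c using Nat.strong_induction_on with
  | _ c IH =>
    intro x
    rw [reachB, mem_splitsB N c (c - 0) 0 rfl]
    simp only [tmem_insert]
    constructor
    · rintro ((rfl | h) | ⟨j, hj1, hj2, a, b, ha, hb, hop⟩)
      · exact Reach.seed c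
      · simp at h
      · have hr := Reach.comb j (c - j) a b x hj1 (by omega)
          ((IH j hj2 a).mp ha) ((IH (c - j) (by omega) b).mp hb) hop
        rwa [Nat.add_sub_cancel' (by omega)] at hr
    · intro h
      rcases reach_cases h with rfl | ⟨k, m, a, b, hc, hk, hm, ha, hb, hop⟩
      · exact Or.inl (Or.inl rfl)
      · refine Or.inr ⟨k, hk, by omega, a, b,
          (IH k (by omega) a).mpr ha, ?_, hop⟩
        have : c - k = m := by omega
        rw [this]
        exact (IH m (by omega) b).mpr hb

-- ---- A side ----

def InitNS (N : Int) : List (Std.TreeSet Int) :=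
  (List.range 8).map (fun t => (∅ : Std.TreeSet Int).insert (seedNum N (t + 1)))

def stepI (ns : List (Std.TreeSet Int)) (i : Int) : List (Std.TreeSet Int) :=
  (PySem.List.pyRange 0 i).foldl (fun ns j =>
    PySem.List.pySetD ns i (
      (PySem.List.pyGetD ns j ∅).foldl (fun acc num1 =>
        (PySem.List.pyGetD ns (i - j - 1) ∅).foldl (fun acc num2 =>
          let acc := acc.insert (num1 + num2)
          let acc := acc.insert (num1 - num2)
          let acc := acc.insert (num1 * num2)
          if num2 ≠ 0 then acc.insert (PySem.Int.floordiv num1 num2) else acc)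
          acc)
        (PySem.List.pyGetD ns i ∅))) ns

lemma solution_eq (N number : Int) :
    solution N number = solutionScan ((PySem.List.pyRange 1 8).foldl stepI (InitNS N)) number 1 := rfl

def GoodA (N : Int) (ns : List (Std.TreeSet Int)) (i : Nat) : Prop :=
  ns.length = 8 ∧
  (∀ t, t < 8 → t ≤ i → (∀ x, x ∈ ns.getD t ∅ ↔ Reach N (t + 1) x)) ∧
  (∀ t, t < 8 → i < t → ns.getD t ∅ = (∅ : Std.TreeSet Int).insert (seedNum N (t + 1)))

lemma reach_one (N : Int) (x : Int) : Reach N 1 x ↔ x = seedNum N 1 := by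
  constructor
  · intro h
    rcases reach_cases h with h | ⟨k, m, a, b, hc, hk, hm, _⟩
    · exact h
    · omega
  · rintro rfl; exact Reach.seed 1

lemma goodA_init (N : Int) : GoodA N (InitNS N) 0 := by
  refine ⟨by simp [InitNS], ?_, ?_⟩
  · intro t ht ht0 x
    have ht' : t = 0 := by omega
    subst ht'
    rw [InitNS, PySem.List.getD_map_range _ _ _ _ (by omega)]
    rw [reach_one]
    simp only [tmem_insert]
    simp
  · intro t ht h0t
    rw [InitNS, PySem.List.getD_map_range _ _ _ _ ht]

-- invariant of the inner `for j in range(i)` loop: only slot i changed, and it holds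
-- the seed plus all combinations from splits j' < j0 processed so far
def InvI (N : Int) (ns ns' : List (Std.TreeSet Int)) (i j0 : Nat) : Prop :=
  ns'.length = 8 ∧
  (∀ t, t < 8 → t ≠ i → ns'.getD t ∅ = ns.getD t ∅) ∧
  (∀ x, x ∈ ns'.getD i ∅ ↔ x = seedNum N (i + 1) ∨
    ∃ j, j < j0 ∧ ∃ a b, Reach N (j + 1) a ∧ Reach N (i - j) b ∧ OpRel a b x)

lemma getD_set_ne {α : Type} (l : List α) (i t : Nat) (v d : α) (h : t ≠ i) :
    (l.set i v).getD t d = l.getD t d := by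
  simp only [List.getD]
  rw [List.getElem?_set_ne]
  omega

lemma getD_set_self {α : Type} (l : List α) (i : Nat) (v d : α) (h : i < l.length) :
    (l.set i v).getD i d = v := by
  simp only [List.getD]
  rw [List.getElem?_set_self]
  simp
  omega

lemma innerFold (N : Int) (i : Nat) (hi : 1 ≤ i) (hi8 : i < 8)
    (ns : List (Std.TreeSet Int)) (hg : GoodA N ns (i - 1)) :
    ∀ (n j0 : Nat), i - j0 = n → j0 ≤ i → ∀ ns', InvI N ns ns' i j0 →
    InvI N ns ((PySem.List.pyRange (j0 : Int) (i : Int)).foldl (fun ns j =>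
      PySem.List.pySetD ns (i : Int) (
        (PySem.List.pyGetD ns j ∅).foldl (fun acc num1 =>
          (PySem.List.pyGetD ns ((i : Int) - j - 1) ∅).foldl (fun acc num2 =>
            let acc := acc.insert (num1 + num2)
            let acc := acc.insert (num1 - num2)
            let acc := acc.insert (num1 * num2)
            if num2 ≠ 0 then acc.insert (PySem.Int.floordiv num1 num2) else acc)
            acc)
          (PySem.List.pyGetD ns (i : Int) ∅))) ns') i i := by
  intro n
  induction n with
  | zero =>
    intro j0 hj0n hj0 ns' hinv
    have hj : j0 = i := by omega
    subst hj
    rw [PySem.List.pyRange_one_eq_nil (by exact_mod_cast le_refl _)]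
    exact hinv
  | succ n ih =>
    intro j0 hj0n hj0 ns' hinv
    have hj0i : j0 < i := by omega
    rw [PySem.List.pyRange_one_cons (by exact_mod_cast hj0i)]
    rw [List.foldl_cons]
    have hcast : (j0 : Int) + 1 = ((j0 + 1 : Nat) : Int) := by push_cast; ring
    rw [hcast]
    apply ih (j0 + 1) (by omega) (by omega)
    -- one j-step preserves the invariant, advancing j0
    obtain ⟨hlen, hoth, hme⟩ := hinv
    obtain ⟨hglen, hglo, hghi⟩ := hg
    constructor
    · rw [PySem.List.pySetD_natCast, List.length_set, hlen]
    constructor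
    · intro t ht hti
      rw [PySem.List.pySetD_natCast, getD_set_ne _ _ _ _ _ hti]
      exact hoth t ht hti
    · intro x
      rw [PySem.List.pySetD_natCast, getD_set_self _ _ _ _ (by omega)]
      rw [show ((i : Int) - (j0 : Int) - 1) = ((i - j0 - 1 : Nat) : Int) by omega]
      rw [PySem.List.pyGetD_natCast, PySem.List.pyGetD_natCast, PySem.List.pyGetD_natCast]
      simp only [Std.TreeSet.foldl_eq_foldl_toList]
      rw [mem_foldA]
      simp only [Std.TreeSet.mem_toList]
      rw [hme x]
      have hj0ne : j0 ≠ i := by omega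
      have hj1ne : i - j0 - 1 ≠ i := by omega
      have hj0mem := hglo j0 (by omega) (by omega)
      have hj1mem := hglo (i - j0 - 1) (by omega) (by omega)
      rw [hoth j0 (by omega) hj0ne, hoth (i - j0 - 1) (by omega) hj1ne]
      constructor
      · rintro ((rfl | ⟨j, hj, a, b, ha, hb, hop⟩) | ⟨a, ha, b, hb, hop⟩)
        · exact Or.inl rfl
        · exact Or.inr ⟨j, by omega, a, b, ha, hb, hop⟩
        · refine Or.inr ⟨j0, by omega, a, b, (hj0mem a).mp ha, ?_, hop⟩
          have := (hj1mem b).mp hb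
          rwa [show i - j0 - 1 + 1 = i - j0 by omega] at this
      · rintro (rfl | ⟨j, hj, a, b, ha, hb, hop⟩)
        · exact Or.inl (Or.inl rfl)
        · by_cases hjj : j = j0
          · subst hjj
            refine Or.inr ⟨a, (hj0mem a).mpr ha, b, ?_, hop⟩
            apply (hj1mem b).mpr
            rwa [show i - j - 1 + 1 = i - j by omega]
          · exact Or.inl (Or.inr ⟨j, by omega, a, b, ha, hb, hop⟩)

lemma goodA_step (N : Int) (i : Nat) (hi : 1 ≤ i) (hi8 : i < 8)
    (ns : List (Std.TreeSet Int)) (h : GoodA N ns (i - 1)) :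
    GoodA N (stepI ns (i : Int)) i := by
  obtain ⟨hlen, hlo, hhi⟩ := h
  have hinit : InvI N ns ns i 0 := by
    refine ⟨hlen, fun _ _ _ => rfl, ?_⟩
    intro x
    rw [hhi i hi8 (by omega)]
    simp only [tmem_insert]
    constructor
    · rintro (rfl | h)
      · exact Or.inl rfl
      · simp at h
    · rintro (rfl | ⟨j, hj, _⟩)
      · exact Or.inl rfl
      · omega
  have hres := innerFold N i hi hi8 ns ⟨hlen, hlo, hhi⟩ i 0 (by omega) (by omega) ns hinit
  rw [show ((0 : Nat) : Int) = (0 : Int) by norm_num] at hres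
  unfold stepI
  obtain ⟨hlen', hoth', hme'⟩ := hres
  refine ⟨hlen', ?_, ?_⟩
  · intro t ht hti x
    by_cases hteq : t = i
    · subst hteq
      rw [hme' x]
      constructor
      · rintro (rfl | ⟨j, hj, a, b, ha, hb, hop⟩)
        · exact Reach.seed (t + 1)
        · have hr := Reach.comb (j + 1) (t - j) a b x (by omega) (by omega) ha hb hop
          rwa [show j + 1 + (t - j) = t + 1 by omega] at hr
      · intro hr
        rcases reach_cases hr with h | ⟨k, m, a, b, hc, hk, hm, ha, hb, hop⟩
        · exact Or.inl h
        · refine Or.inr ⟨k - 1, by omega, a, b, ?_, ?_, hop⟩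
          · rwa [show k - 1 + 1 = k by omega]
          · rwa [show t - (k - 1) = m by omega]
    · rw [hoth' t ht hteq]
      exact hlo t ht (by omega) x
  · intro t ht hit
    rw [hoth' t ht (by omega)]
    exact hhi t ht (by omega)

-- stepI at a numeral index (the outer loop runs over the literal range [1..7])
lemma goodA_step' (N : Int) (i : Int) (inat : Nat) (hc : i = (inat : Int))
    (hi : 1 ≤ inat) (hi8 : inat < 8)
    (ns : List (Std.TreeSet Int)) (h : GoodA N ns (inat - 1)) :
    GoodA N (stepI ns i) inat := by
  subst hc; exact goodA_step N inat hi hi8 ns h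

-- ===== VERDICT (by name: the statement is the Claim_ definition above) =====
theorem solution_spec : Claim_equal_solution := by
  intro N number _ _
  unfold Spec_solution
  rw [solution_eq]
  have g0 := goodA_init N
  rw [show PySem.List.pyRange 1 8 = [1, 2, 3, 4, 5, 6, 7] from by decide]
  simp only [List.foldl_cons, List.foldl_nil]
  have g1 := goodA_step' N 1 1 (by norm_num) (by norm_num) (by norm_num) _ g0
  have g2 := goodA_step' N 2 2 (by norm_num) (by norm_num) (by norm_num) _ g1
  have g3 := goodA_step' N 3 3 (by norm_num) (by norm_num) (by norm_num) _ g2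
  have g4 := goodA_step' N 4 4 (by norm_num) (by norm_num) (by norm_num) _ g3
  have g5 := goodA_step' N 5 5 (by norm_num) (by norm_num) (by norm_num) _ g4
  have g6 := goodA_step' N 6 6 (by norm_num) (by norm_num) (by norm_num) _ g5
  have g7 := goodA_step' N 7 7 (by norm_num) (by norm_num) (by norm_num) _ g6
  set final := stepI (stepI (stepI (stepI (stepI (stepI (stepI (InitNS N) 1) 2) 3) 4) 5) 6) 7 with hfinal
  obtain ⟨hlen, hlo, _⟩ := g7
  -- expose the 8 slots
  rcases final with _ | ⟨s0, _ | ⟨s1, _ | ⟨s2, _ | ⟨s3, _ | ⟨s4, _ | ⟨s5, _ | ⟨s6, _ | ⟨s7, tl⟩⟩⟩⟩⟩⟩⟩⟩ <;>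
    simp only [List.length_cons, List.length_nil] at hlen
  · omega
  · omega
  · omega
  · omega
  · omega
  · omega
  · omega
  · omega
  have htl : tl = [] := by
    cases tl with
    | nil => rfl
    | cons a b => simp at hlen
  subst htl
  -- each slot's membership agrees with B's reach set
  have key : ∀ (t : Nat) (s : Std.TreeSet Int),
      (∀ x, x ∈ s ↔ Reach N t x) → ((number ∈ s) ↔ number ∈ reachB N t) := by
    intro t s hs
    rw [hs number, mem_reachB]
  have e0 := key 1 s0 (fun x => by simpa using hlo 0 (by norm_num) (by norm_num) x)
  have e1 := key 2 s1 (fun x => by simpa using hlo 1 (by norm_num) (by norm_num) x)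
  have e2 := key 3 s2 (fun x => by simpa using hlo 2 (by norm_num) (by norm_num) x)
  have e3 := key 4 s3 (fun x => by simpa using hlo 3 (by norm_num) (by norm_num) x)
  have e4 := key 5 s4 (fun x => by simpa using hlo 4 (by norm_num) (by norm_num) x)
  have e5 := key 6 s5 (fun x => by simpa using hlo 5 (by norm_num) (by norm_num) x)
  have e6 := key 7 s6 (fun x => by simpa using hlo 6 (by norm_num) (by norm_num) x)
  have e7 := key 8 s7 (fun x => by simpa using hlo 7 (by norm_num) (by norm_num) x)
  rw [solution_alt, show PySem.List.pyRange 1 9 = [1, 2, 3, 4, 5, 6, 7, 8] from by decide]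
  simp only [solutionScan, solutionAltLoop]
  norm_num [e0, e1, e2, e3, e4, e5, e6, e7, show Int.toNat 2 = 2 from rfl, show Int.toNat 3 = 3 from rfl, show Int.toNat 4 = 4 from rfl, show Int.toNat 5 = 5 from rfl, show Int.toNat 6 = 6 from rfl, show Int.toNat 7 = 7 from rfl, show Int.toNat 8 = 8 from rfl]

def solution_raises : Claim_raises_solution := by
  unfold Claim_raises_solution
  constructor
  · intro N number _ hr
    unfold Raises_solution at hr
    unfold Pre_solution
    omega
  · refine ⟨by decide, by decide, ?_⟩
    show solutionAltLoop (-5) (-5) (PySem.List.pyRange 1 9) = 1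
    rw [show PySem.List.pyRange 1 9 = [1, 2, 3, 4, 5, 6, 7, 8] from by decide]
    rw [solutionAltLoop]
    rw [show ((reachB (-5) (1 : Int).toNat).contains (-5)) = true from by
      rw [show (1 : Int).toNat = 1 from rfl, reachB, splitsB]
      decide]
    simp
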